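-- pv_equiv track=rewrite | github.com/gamer8787/algorithm | 프로그래머스/2/77885. 2개 이하로 다른 비트/2개 이하로 다른 비트.py | solution
-- ===== SOURCE A (Python) =====
-- def solution(numbers):
--     answer = []
--     for n in numbers:
--         if n %2==0:
--             answer.append(n+1)
--         else:
--             c = 0 #1연속 개수
--             a = bin(n)[2:]
--             for i in a[::-1]:
--                 if i =="1":
--                     c+=1
--                 else:
--                     break
--             answer.append(n+2**(c-1))
--     return answer
-- ===== SOURCE B (Python) =====
-- def _lowbit(m):
--     # largest power of two dividing m (m >= 1)
--     p = 1
--     while m % (2 * p) == 0: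
--         p *= 2
--     return p
--
--
-- def solution(numbers):
--     return [n + 1 if n % 2 == 0 else n + _lowbit(abs(n) + 1) // 2 for n in numbers]
-- ===== Notes on version B (the rewrite author's own statement) =====
-- stated objective: alternative
-- what changed: Replaces A's binary-string construction (bin) and reversed character scan for trailing ones with a purely arithmetic computation: the term added to an odd n is (largest power of two dividing |n|+1)//2, found by repeated divisibility doubling; the output list is a comprehension instead of append-in-loop.
import Mathlib
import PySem

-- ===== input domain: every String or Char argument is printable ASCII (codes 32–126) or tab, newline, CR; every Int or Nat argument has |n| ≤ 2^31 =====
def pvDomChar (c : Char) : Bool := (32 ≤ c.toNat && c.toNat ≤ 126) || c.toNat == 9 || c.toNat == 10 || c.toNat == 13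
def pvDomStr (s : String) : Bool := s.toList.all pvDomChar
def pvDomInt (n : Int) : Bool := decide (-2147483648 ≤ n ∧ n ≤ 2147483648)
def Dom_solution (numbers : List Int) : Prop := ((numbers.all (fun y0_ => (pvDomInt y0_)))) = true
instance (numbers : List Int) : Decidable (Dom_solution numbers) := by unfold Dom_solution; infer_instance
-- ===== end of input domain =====

-- B replaces A's binary-string scan for trailing ones by arithmetic on |n|+1 (alternative
-- decomposition, same return value on every input; no side effects in either version).

-- ===== PORT A =====
-- the inner `for i in a[::-1]: if i=="1": c+=1 else: break` loop (a[::-1] is the reverse)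
def countTrailOnes : List Char → Nat
  | [] => 0
  | i :: rest => if i = '1' then countTrailOnes rest + 1 else 0

def solution (numbers : List Int) : List Int :=
  numbers.foldl (fun answer n =>
    if PySem.Int.mod n 2 = 0 then
      answer ++ [n + 1]
    else
      -- a = bin(n)[2:]
      let a := PySem.List.slice (PySem.Int.toBinChars0b n) (some 2) none
      let c := countTrailOnes a.reverse
      answer ++ [n + (2 : Int) ^ (c - 1)]) []

-- ===== PORT B =====
-- _lowbit: p = 1; while m % (2*p) == 0: p *= 2; return p
-- (the `0 < p ∧ 0 < m` guard conjuncts only make the recursion total; they hold on every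
--  call the port makes, so the loop condition is exactly Python's)
def lowbitAux (m p : Nat) : Nat :=
  if h : 0 < p ∧ m % (2 * p) = 0 ∧ 0 < m then lowbitAux m (2 * p) else p
termination_by m + 1 - p
decreasing_by
  have h2 : 2 * p ∣ m := (Nat.dvd_iff_mod_eq_zero).mpr h.2.1
  have := Nat.le_of_dvd h.2.2 h2
  omega

def solution_alt (numbers : List Int) : List Int :=
  numbers.map (fun n =>
    if PySem.Int.mod n 2 = 0 then n + 1
    else n + PySem.Int.floordiv ((lowbitAux (n.natAbs + 1) 1 : Nat) : Int) 2)

-- ===== PRECONDITION & SPEC =====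
def Spec_solution (numbers : List Int) (out : List Int) : Prop := out = solution_alt numbers
instance (numbers : List Int) (out : List Int) : Decidable (Spec_solution numbers out) := by unfold Spec_solution; infer_instance

-- ===== CLAIM (what is proved, stated in full; the proofs are below) =====
def Claim_equal_solution : Prop := ∀ (numbers : List Int), Dom_solution numbers → Spec_solution numbers (solution numbers)

-- ===== LEMMAS AND PROOFS =====

-- number of trailing 1-bits of m (the c that A's string scan computes)
def trailOnes (m : Nat) : Nat :=
  if h : m % 2 = 1 then trailOnes (m / 2) + 1 else 0
termination_by m
decreasing_by omega

-- structural characterisation of Nat.toDigits 2 (what toBinChars0b is built from)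
def binDigits (n : Nat) : List Char :=
  if h : n / 2 = 0 then [Nat.digitChar (n % 2)]
  else binDigits (n / 2) ++ [Nat.digitChar (n % 2)]
termination_by n
decreasing_by omega

theorem toDigitsCore_eq (n : Nat) : ∀ (f : Nat) (ds : List Char), n < f →
    Nat.toDigitsCore 2 f n ds = binDigits n ++ ds := by
  induction n using Nat.strong_induction_on with
  | _ n ih =>
    intro f ds hf
    match f with
    | 0 => omega
    | f + 1 =>
      rw [Nat.toDigitsCore]
      by_cases h : n / 2 = 0
      · simp [h, binDigits]
      · simp only [h, if_false]
        rw [ih (n / 2) (by omega) f _ (by omega)]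
        conv_rhs => rw [binDigits, dif_neg h]
        simp

theorem toDigits_eq (n : Nat) : Nat.toDigits 2 n = binDigits n := by
  have := toDigitsCore_eq n (n + 1) [] (by omega)
  simpa [Nat.toDigits] using this

theorem countTrailOnes_append_ne (l : List Char) (c : Char) (hc : c ≠ '1') :
    countTrailOnes (l ++ [c]) = countTrailOnes l := by
  induction l with
  | nil => simp [countTrailOnes, hc]
  | cons x xs ih => by_cases h : x = '1' <;> simp [countTrailOnes, h, ih]

theorem countTrailOnes_binDigits (n : Nat) :
    countTrailOnes (binDigits n).reverse = trailOnes n := by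
  induction n using Nat.strong_induction_on with
  | _ n ih =>
    rw [binDigits, trailOnes]
    by_cases h2 : n % 2 = 1
    · have hd : Nat.digitChar (n % 2) = '1' := by rw [h2]; rfl
      rw [dif_pos h2]
      by_cases h : n / 2 = 0
      · rw [dif_pos h, hd]
        simp [countTrailOnes, h, trailOnes]
      · rw [dif_neg h, hd, List.reverse_append]
        simp only [List.reverse_singleton, List.singleton_append, countTrailOnes]
        simp [ih (n / 2) (by omega)]
    · have h2' : n % 2 = 0 := by omega
      have hd : Nat.digitChar (n % 2) = '0' := by rw [h2']; rfl
      rw [dif_neg h2]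
      by_cases h : n / 2 = 0
      · rw [dif_pos h, hd]; simp [countTrailOnes]
      · rw [dif_neg h, hd, List.reverse_append]
        simp [countTrailOnes]

-- 2-adic valuation fact: 2^(trailOnes m) exactly divides m+1
theorem trailOnes_val (m : Nat) :
    2 ^ trailOnes m ∣ (m + 1) ∧ ¬ 2 ^ (trailOnes m + 1) ∣ (m + 1) := by
  induction m using Nat.strong_induction_on with
  | _ m ih =>
    rw [trailOnes]
    by_cases h2 : m % 2 = 1
    · have hm : 0 < m := by omega
      obtain ⟨ihd, ihnd⟩ := ih (m / 2) (by omega)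
      have hsplit : m + 1 = 2 * (m / 2 + 1) := by omega
      rw [dif_pos h2]
      constructor
      · rw [hsplit, pow_succ, Nat.mul_comm]
        exact Nat.mul_dvd_mul_left 2 ihd
      · intro hdvd
        apply ihnd
        rw [hsplit] at hdvd
        rw [pow_succ, Nat.mul_comm (2 ^ (trailOnes (m / 2) + 1)) 2] at hdvd
        exact (Nat.mul_dvd_mul_iff_left (by omega : 0 < 2)).mp hdvd
    · rw [dif_neg h2]
      refine ⟨by simp, ?_⟩
      intro hdvd
      have : 2 ∣ m + 1 := dvd_trans (by norm_num) hdvd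
      omega

theorem lowbitAux_eq (T : Nat) : ∀ (d k M : Nat), d = T - k → 0 < M → k ≤ T →
    2 ^ T ∣ M → ¬ 2 ^ (T + 1) ∣ M → lowbitAux M (2 ^ k) = 2 ^ T := by
  intro d
  induction d with
  | zero =>
    intro k M hd hM hkT hdvd hndvd
    have hk : k = T := by omega
    subst hk
    rw [lowbitAux, dif_neg]
    rintro ⟨-, hmod, -⟩
    have hdd : 2 * 2 ^ k ∣ M := (Nat.dvd_iff_mod_eq_zero).mpr hmod
    rw [show 2 * 2 ^ k = 2 ^ (k + 1) by ring] at hdd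
    exact hndvd hdd
  | succ d ihd =>
    intro k M hd hM hkT hdvd hndvd
    have hkT' : k < T := by omega
    rw [lowbitAux]
    by_cases hmod : M % (2 * 2 ^ k) = 0
    · rw [dif_pos ⟨by positivity, hmod, hM⟩, show 2 * 2 ^ k = 2 ^ (k + 1) by ring]
      exact ihd (k + 1) M (by omega) hM (by omega) hdvd hndvd
    · exfalso
      apply hmod
      have hk1 : 2 ^ (k + 1) ∣ M := dvd_trans (pow_dvd_pow 2 (by omega)) hdvd
      rw [show 2 * 2 ^ k = 2 ^ (k + 1) by ring]
      exact (Nat.dvd_iff_mod_eq_zero).mp hk1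

theorem trailOnes_pos (m : Nat) (h : m % 2 = 1) : 0 < trailOnes m := by
  rw [trailOnes, dif_pos h]; omega

-- per-element agreement in the odd branch
theorem odd_elem_eq (n : Int) (h : ¬ PySem.Int.mod n 2 = 0) :
    (2 : Int) ^ (countTrailOnes (PySem.List.slice (PySem.Int.toBinChars0b n) (some 2) none).reverse - 1)
      = PySem.Int.floordiv ((lowbitAux (n.natAbs + 1) 1 : Nat) : Int) 2 := by
  have h2 : ¬ (2 : Int) ∣ n := fun hd => h ((PySem.Int.mod_eq_zero_iff_dvd n 2).mpr hd)
  have hm : n.natAbs % 2 = 1 := by omega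
  have hT := trailOnes_val n.natAbs
  have hTpos := trailOnes_pos n.natAbs hm
  have hlow : lowbitAux (n.natAbs + 1) 1 = 2 ^ trailOnes n.natAbs := by
    have hle := lowbitAux_eq (trailOnes n.natAbs) (trailOnes n.natAbs) 0 (n.natAbs + 1)
      (by omega) (by omega) (by omega) hT.1 hT.2
    simpa using hle
  have hcount : countTrailOnes
      (PySem.List.slice (PySem.Int.toBinChars0b n) (some 2) none).reverse = trailOnes n.natAbs := by
    rw [PySem.List.slice_from (PySem.Int.toBinChars0b n) (by norm_num : (0:Int) ≤ 2)]
    by_cases hneg : n < 0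
    · rw [PySem.Int.toBinChars0b, if_pos hneg]
      show countTrailOnes (('b' :: Nat.toDigits 2 n.natAbs).reverse) = _
      rw [List.reverse_cons, countTrailOnes_append_ne _ 'b' (by decide),
        toDigits_eq, countTrailOnes_binDigits]
    · rw [PySem.Int.toBinChars0b, if_neg hneg]
      show countTrailOnes ((Nat.toDigits 2 n.toNat).reverse) = _
      rw [show n.toNat = n.natAbs by omega, toDigits_eq, countTrailOnes_binDigits]
  rw [hcount, hlow]
  obtain ⟨t, ht⟩ : ∃ t, trailOnes n.natAbs = t + 1 := ⟨trailOnes n.natAbs - 1, by omega⟩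
  rw [ht]
  have hfd : PySem.Int.floordiv (((2 ^ (t + 1) : Nat) : Int)) 2 = (((2 ^ (t + 1) / 2 : Nat)) : Int) := by
    exact_mod_cast PySem.Int.floordiv_natCast (2 ^ (t + 1)) 2
  rw [hfd, show (2 : Nat) ^ (t + 1) / 2 = 2 ^ t by rw [pow_succ]; exact Nat.mul_div_cancel _ (by omega)]
  push_cast
  norm_num

theorem solution_foldl (ns : List Int) : ∀ acc : List Int,
    ns.foldl (fun answer n =>
      if PySem.Int.mod n 2 = 0 then answer ++ [n + 1]
      else
        let a := PySem.List.slice (PySem.Int.toBinChars0b n) (some 2) none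
        let c := countTrailOnes a.reverse
        answer ++ [n + (2 : Int) ^ (c - 1)]) acc
    = acc ++ ns.map (fun n =>
        if PySem.Int.mod n 2 = 0 then n + 1
        else n + PySem.Int.floordiv ((lowbitAux (n.natAbs + 1) 1 : Nat) : Int) 2) := by
  induction ns with
  | nil => intro acc; simp
  | cons x xs ih =>
    intro acc
    simp only [List.foldl_cons, List.map_cons]
    by_cases h : PySem.Int.mod x 2 = 0
    · rw [if_pos h, if_pos h, ih]; simp
    · rw [if_neg h, if_neg h, ih, odd_elem_eq x h]; simp

-- ===== VERDICT (by name: the statement is the Claim_ definition above) =====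
theorem solution_spec : Claim_equal_solution := by
  intro numbers _
  unfold Spec_solution solution solution_alt
  exact solution_foldl numbers []
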